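-- pv_equiv track=rewrite | github.com/RostikRK/UCU | BasicsOfProgramming/FirstTerm/Lab7/common_names.py | common_names
-- ===== SOURCE A (Python) =====
-- def common_names(female_names, male_names):
--     """
--     (list, list) -> set
--     Compares the names from 2 lists which starts with vowel
--
--     >>> common_names(['Adda', 'Stone', 'Olivia'], ['Mender', 'Olivia'])
--     {'Olivia'}
--     """
--     femtrue = set()
--     maltrue = set()
--     for ner in female_names:
--         if ner.startswith("A") or ner.startswith("E") or ner.startswith("I") or\
-- ner.startswith("O") or ner.startswith("U") == True:
--             femtrue.add(ner)
--     for net in male_names: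
--         if net.startswith("A") or net.startswith("E") or net.startswith("I") or\
-- net.startswith("O") or net.startswith("U") == True:
--             maltrue.add(net)
--     res = femtrue.intersection(maltrue)
--     return res
-- ===== SOURCE B (Python) =====
-- def common_names(female_names, male_names):
--     """
--     (list, list) -> set
--     One membership set over male_names plus a single filtered pass over
--     female_names, instead of building two vowel sets and intersecting them.
--     """
--     males = set(male_names)
--     return {n for n in female_names
--             if n.startswith(("A", "E", "I", "O", "U")) and n in males}
-- ===== Notes on version B (the rewrite author's own statement) =====
-- stated objective: simpler
-- what changed: B drops the second vowel set and the explicit intersection: it builds one membership set of male names and does a single filtered pass over female_names, checking the vowel prefix with one startswith-on-a-tuple call.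
import Mathlib
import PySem

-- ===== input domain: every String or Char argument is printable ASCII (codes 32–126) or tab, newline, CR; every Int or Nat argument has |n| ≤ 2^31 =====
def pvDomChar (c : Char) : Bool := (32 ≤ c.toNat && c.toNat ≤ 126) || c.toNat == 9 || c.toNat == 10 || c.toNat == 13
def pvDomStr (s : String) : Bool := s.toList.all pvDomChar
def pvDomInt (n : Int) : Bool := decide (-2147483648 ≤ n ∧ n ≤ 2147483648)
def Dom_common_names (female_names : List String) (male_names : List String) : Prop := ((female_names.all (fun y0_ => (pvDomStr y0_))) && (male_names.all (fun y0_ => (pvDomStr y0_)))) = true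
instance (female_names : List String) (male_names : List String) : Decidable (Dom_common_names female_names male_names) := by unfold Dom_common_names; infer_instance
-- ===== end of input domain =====

-- B builds one membership set of the male names and does a single filtered pass over
-- female_names, instead of A's two vowel sets and an explicit intersection. (objective: simpler)

-- ===== PORT A =====
-- the chained startswith test of A, with its harmless trailing '== True'
def pvVowelA (s : String) : Bool :=
  PySem.Str.startswith s "A" || PySem.Str.startswith s "E" || PySem.Str.startswith s "I" ||
    PySem.Str.startswith s "O" || (PySem.Str.startswith s "U" == true)

def common_names (female_names : List String) (male_names : List String) : List String :=
  let femtrue : PySem.Set String :=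
    female_names.foldl (fun s ner => if pvVowelA ner then PySem.Set.add s ner else s) PySem.Set.empty
  let maltrue : PySem.Set String :=
    male_names.foldl (fun s net => if pvVowelA net then PySem.Set.add s net else s) PySem.Set.empty
  PySem.Set.inter femtrue maltrue

-- ===== PORT B =====
-- n.startswith(("A","E","I","O","U"))
def pvVowelB (s : String) : Bool :=
  ["A", "E", "I", "O", "U"].any (fun p => PySem.Str.startswith s p)

def common_names_alt (female_names : List String) (male_names : List String) : List String :=
  let males : PySem.Set String := PySem.Set.ofList male_names
  PySem.Set.ofList
    (female_names.filter (fun n => pvVowelB n && PySem.Set.contains males n))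

-- ===== PRECONDITION & SPEC =====
def Spec_common_names (female_names : List String) (male_names : List String) (out : List String) : Prop := out = common_names_alt female_names male_names
instance (female_names : List String) (male_names : List String) (out : List String) : Decidable (Spec_common_names female_names male_names out) := by unfold Spec_common_names; infer_instance

-- ===== CLAIM (what is proved, stated in full; the proofs are below) =====
def Claim_equal_common_names : Prop := ∀ (female_names : List String) (male_names : List String), Dom_common_names female_names male_names → Spec_common_names female_names male_names (common_names female_names male_names)

-- ===== LEMMAS AND PROOFS =====

-- A's 'for x in l: if p(x): s.add(x)' loop builds Set.update acc (l.filter p)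
theorem pv_foldl_add_filter (p : String → Bool) (l : List String) (acc : PySem.Set String) :
    l.foldl (fun s n => if p n then PySem.Set.add s n else s) acc
      = PySem.Set.update acc (l.filter p) := by
  induction l generalizing acc with
  | nil => rfl
  | cons x xs ih =>
      by_cases h : p x = true
      · simp [h, PySem.Set.update_cons, ih]
      · simp [h, ih]

theorem pv_update_empty (l : List String) :
    PySem.Set.update PySem.Set.empty l = PySem.Set.ofList l := rfl

theorem pv_inter_filter (s t : PySem.Set String) :
    PySem.Set.inter s t = s.filter (fun x => PySem.Set.contains t x) := rfl

-- filtering commutes with first-occurrence dedup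
theorem pv_filter_ofList (p : String → Bool) (xs : List String) :
    (PySem.Set.ofList xs).filter p = PySem.Set.ofList (xs.filter p) := by
  induction xs using List.reverseRecOn with
  | nil => rfl
  | append_singleton xs x ih =>
      rw [PySem.Set.ofList_append_singleton, List.filter_append]
      by_cases hx : x ∈ xs
      · have hmem : x ∈ PySem.Set.ofList xs := by simp [PySem.Set.mem_ofList, hx]
        rw [PySem.Set.add_of_mem hmem]
        by_cases hp : p x = true
        · have hx' : x ∈ PySem.Set.ofList (xs.filter p) := by
            simp [PySem.Set.mem_ofList, List.mem_filter, hx, hp]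
          simp [hp, ih, PySem.Set.ofList_append_singleton, PySem.Set.add_of_mem hx']
        · simp [hp, ih]
      · have hmem : x ∉ PySem.Set.ofList xs := by simp [PySem.Set.mem_ofList, hx]
        rw [PySem.Set.add_of_not_mem hmem]
        by_cases hp : p x = true
        · have hx' : x ∉ PySem.Set.ofList (xs.filter p) := by
            simp [PySem.Set.mem_ofList, List.mem_filter, hx]
          simp [hp, ih, PySem.Set.ofList_append_singleton, PySem.Set.add_of_not_mem hx']
        · simp [hp, ih]

theorem pv_vowel_eq (s : String) : pvVowelA s = pvVowelB s := by
  simp [pvVowelA, pvVowelB, List.any, Bool.or_assoc]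

-- for a vowel-starting name, membership in the male vowel set is membership in the male name set
theorem pv_contains_eq (m : List String) (n : String) (hn : pvVowelA n = true) :
    PySem.Set.contains (PySem.Set.ofList (m.filter pvVowelA)) n
      = PySem.Set.contains (PySem.Set.ofList m) n := by
  have h : ∀ (a b : Bool), (a = true ↔ b = true) → a = b := by decide
  apply h
  simp only [PySem.Set.contains_iff, PySem.Set.mem_ofList, List.mem_filter]
  exact ⟨fun h1 => h1.1, fun h1 => ⟨h1, hn⟩⟩

-- ===== VERDICT (by name: the statement is the Claim_ definition above) =====
theorem common_names_spec : Claim_equal_common_names := by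
  intro female_names male_names _
  show common_names female_names male_names = common_names_alt female_names male_names
  unfold common_names common_names_alt
  rw [pv_foldl_add_filter, pv_foldl_add_filter]
  simp only [pv_update_empty]
  rw [pv_inter_filter, pv_filter_ofList, List.filter_filter]
  congr 1
  apply List.filter_congr
  intro n _
  by_cases hn : pvVowelA n = true
  · rw [pv_contains_eq _ _ hn, ← pv_vowel_eq]
    simp [hn, Bool.and_comm]
  · simp only [Bool.not_eq_true] at hn
    rw [← pv_vowel_eq]
    simp [hn]
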